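-- pv_equiv track=rewrite | github.com/pypi-data/pypi-mirror-399 | packages/aa-bb/aa_bb-3.2.5.tar.gz/aa_bb-3.2.5/aa_bb/app_settings.py | _chunk_embed_lines
-- ===== SOURCE A (Python) =====
-- def _chunk_embed_lines(lines, max_chars=1900):
--     """
--     Split a list of lines into chunks whose joined text length
--     is <= max_chars, without breaking ``` code blocks.
--
--     Returns: List[List[str]] – each inner list is one embed body.
--     """
--     # First, group into "segments": either a full code block or a run of normal lines
--     segments = []
--     current_segment = []
--     in_code = False
--
--     for line in lines:
--         stripped = line.strip()
--
--         if stripped.startswith("```"):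
--             # Starting a new code block
--             if not in_code:
--                 # flush any accumulated non-code segment
--                 if current_segment:
--                     segments.append(current_segment)
--                     current_segment = []
--                 in_code = True
--                 current_segment = [line]
--             else:
--                 # closing an existing code block
--                 current_segment.append(line)
--                 segments.append(current_segment)
--                 current_segment = []
--                 in_code = False
--         elif not in_code and (line.startswith("#") or line.startswith("- ") or line.startswith("* ") or line.startswith("  - ") or line.startswith("  * ")):
--             # Break at top-level bullet points or headers to keep related indented lines together
--             if current_segment:
--                 segments.append(current_segment)
--             current_segment = [line]
--         else:
--             current_segment.append(line)
--
--     if current_segment: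
--         segments.append(current_segment)
--
--     # Now pack segments into chunks by total char length
--     chunks = []
--     current_chunk = []
--     current_len = 0
--
--     for seg in segments:
--         # Estimate length if we add this segment (with newlines)
--         seg_text = "\n".join(seg)
--         seg_len = len(seg_text) + (1 if current_chunk else 0)  # +1 for newline before segment
--
--         if seg_len > max_chars:
--             # Segment itself is huge; fall back to splitting inside it line-by-line
--             for line in seg:
--                 line_len = len(line) + (1 if current_chunk else 0)
--                 if current_len + line_len > max_chars and current_chunk:
--                     chunks.append(current_chunk)
--                     current_chunk = [line]
--                     current_len = len(line)
--                 else: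
--                     current_chunk.append(line)
--                     current_len += line_len
--             continue
--
--         if current_len + seg_len > max_chars and current_chunk:
--             # Start a new chunk
--             chunks.append(current_chunk)
--             current_chunk = list(seg)
--             current_len = len(seg_text)
--         else:
--             # Add segment to current chunk
--             if current_chunk:
--                 current_chunk.append("")  # ensure a blank line between segments
--                 current_len += 1
--             current_chunk.extend(seg)
--             current_len += len(seg_text)
--
--     if current_chunk:
--         chunks.append(current_chunk)
--
--     return chunks
-- ===== SOURCE B (Python) =====
-- def _chunk_embed_lines(lines, max_chars=1900):
--     """Single streaming pass: segmentation and packing fused (no intermediate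
--     segments table); the packing step is applied as each segment completes."""
--     chunks = []
--     cur = []
--     clen = 0
--
--     def pack(seg):
--         nonlocal chunks, cur, clen
--         seg_text = "\n".join(seg)
--         seg_len = len(seg_text) + (1 if cur else 0)
--         if seg_len > max_chars:
--             for line in seg:
--                 line_len = len(line) + (1 if cur else 0)
--                 if clen + line_len > max_chars and cur:
--                     chunks.append(cur)
--                     cur = [line]
--                     clen = len(line)
--                 else:
--                     cur.append(line)
--                     clen += line_len
--             return
--         if clen + seg_len > max_chars and cur:
--             chunks.append(cur)
--             cur = list(seg)
--             clen = len(seg_text)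
--         else:
--             if cur:
--                 cur.append("")
--                 clen += 1
--             cur.extend(seg)
--             clen += len(seg_text)
--
--     seg = []
--     in_code = False
--     for line in lines:
--         stripped = line.strip()
--         if stripped.startswith("```"):
--             if not in_code:
--                 if seg:
--                     pack(seg)
--                 seg = [line]
--                 in_code = True
--             else:
--                 seg.append(line)
--                 pack(seg)
--                 seg = []
--                 in_code = False
--         elif not in_code and (line.startswith("#") or line.startswith("- ") or line.startswith("* ") or line.startswith("  - ") or line.startswith("  * ")):
--             if seg:
--                 pack(seg)
--             seg = [line]
--         else:
--             seg.append(line)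
--     if seg:
--         pack(seg)
--     if cur:
--         chunks.append(cur)
--     return chunks
-- ===== Notes on version B (the rewrite author's own statement) =====
-- stated objective: alternative
-- what changed: Replaced A's two-phase build-a-segments-table-then-repack structure with a single streaming pass that fuses segmentation and packing, applying the packing step as each segment completes so the intermediate segments list never exists.
import Mathlib
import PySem

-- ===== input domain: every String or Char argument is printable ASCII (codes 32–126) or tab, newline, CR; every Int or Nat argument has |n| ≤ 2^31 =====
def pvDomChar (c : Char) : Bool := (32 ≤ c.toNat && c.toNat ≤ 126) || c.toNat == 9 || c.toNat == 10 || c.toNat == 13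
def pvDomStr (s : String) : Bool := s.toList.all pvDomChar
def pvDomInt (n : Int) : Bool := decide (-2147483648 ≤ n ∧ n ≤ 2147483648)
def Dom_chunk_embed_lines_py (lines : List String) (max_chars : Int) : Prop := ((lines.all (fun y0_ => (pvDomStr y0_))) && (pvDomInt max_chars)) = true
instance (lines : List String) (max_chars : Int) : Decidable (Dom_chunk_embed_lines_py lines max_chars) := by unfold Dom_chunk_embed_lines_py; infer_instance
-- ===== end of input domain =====

-- B fuses A's build-segments-then-pack two-pass structure into one streaming pass
-- (same packing step applied as each segment completes); objective: simpler/alternative, not faster.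

-- ===== PORT A =====

-- packing state: (chunks, current_chunk, current_len)
abbrev PvPackState := List (List String) × List String × Int

-- the bullet/header test of A's `elif` branch
def pvIsBreak (line : String) : Bool :=
  PySem.Str.startswith line "#" || PySem.Str.startswith line "- " ||
  PySem.Str.startswith line "* " || PySem.Str.startswith line "  - " ||
  PySem.Str.startswith line "  * "

-- inner line-by-line fallback body of the packing loop
def pvPackLine (max_chars : Int) (st : PvPackState) (line : String) : PvPackState :=
  let (chunks, cur, clen) := st
  let line_len : Int := (PySem.Str.len line : Int) + (if cur ≠ [] then 1 else 0)
  if clen + line_len > max_chars ∧ cur ≠ [] then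
    (chunks ++ [cur], [line], (PySem.Str.len line : Int))
  else
    (chunks, cur ++ [line], clen + line_len)

-- body of A's second loop (pack one segment); B invokes the same step per completed segment
def pvPackSeg (max_chars : Int) (st : PvPackState) (seg : List String) : PvPackState :=
  let (chunks, cur, clen) := st
  let seg_text := PySem.Str.join "\n" seg
  let seg_len : Int := (PySem.Str.len seg_text : Int) + (if cur ≠ [] then 1 else 0)
  if seg_len > max_chars then
    seg.foldl (pvPackLine max_chars) (chunks, cur, clen)
  else if clen + seg_len > max_chars ∧ cur ≠ [] then
    (chunks ++ [cur], seg, (PySem.Str.len seg_text : Int))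
  else
    let (cur2, clen2) := if cur ≠ [] then (cur ++ [""], clen + 1) else (cur, clen)
    (chunks, cur2 ++ seg, clen2 + (PySem.Str.len seg_text : Int))

-- body of A's first loop: state (segments, current_segment, in_code)
def pvSegStep (st : List (List String) × List String × Bool) (line : String) :
    List (List String) × List String × Bool :=
  let (segs, cur, in_code) := st
  let stripped := PySem.Str.strip line
  if PySem.Str.startswith stripped "```" then
    if !in_code then
      ((if cur ≠ [] then segs ++ [cur] else segs), [line], true)
    else
      (segs ++ [cur ++ [line]], [], false)
  else if !in_code ∧ pvIsBreak line then
    ((if cur ≠ [] then segs ++ [cur] else segs), [line], in_code)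
  else
    (segs, cur ++ [line], in_code)

def chunk_embed_lines_py (lines : List String) (max_chars : Int) : List (List String) :=
  let (segs, cur, _) := lines.foldl pvSegStep ([], [], false)
  let segs := if cur ≠ [] then segs ++ [cur] else segs
  let (chunks, cur2, _) := segs.foldl (pvPackSeg max_chars) ([], [], 0)
  if cur2 ≠ [] then chunks ++ [cur2] else chunks

-- ===== PORT B =====

-- body of B's single fused loop: state ((chunks, current_chunk, current_len), current_segment, in_code)
def pvBStep (max_chars : Int) (st : PvPackState × List String × Bool) (line : String) :
    PvPackState × List String × Bool :=
  let (pst, seg, in_code) := st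
  let stripped := PySem.Str.strip line
  if PySem.Str.startswith stripped "```" then
    if !in_code then
      ((if seg ≠ [] then pvPackSeg max_chars pst seg else pst), [line], true)
    else
      (pvPackSeg max_chars pst (seg ++ [line]), [], false)
  else if !in_code ∧ pvIsBreak line then
    ((if seg ≠ [] then pvPackSeg max_chars pst seg else pst), [line], in_code)
  else
    (pst, seg ++ [line], in_code)

def chunk_embed_lines_py_alt (lines : List String) (max_chars : Int) : List (List String) :=
  let (pst, seg, _) := lines.foldl (pvBStep max_chars) (([], [], 0), [], false)
  let (chunks, cur, _) := if seg ≠ [] then pvPackSeg max_chars pst seg else pst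
  if cur ≠ [] then chunks ++ [cur] else chunks

-- ===== PRECONDITION & SPEC =====
def Spec_chunk_embed_lines_py (lines : List String) (max_chars : Int) (out : List (List String)) : Prop := out = chunk_embed_lines_py_alt lines max_chars
instance (lines : List String) (max_chars : Int) (out : List (List String)) : Decidable (Spec_chunk_embed_lines_py lines max_chars out) := by unfold Spec_chunk_embed_lines_py; infer_instance

-- ===== CLAIM (what is proved, stated in full; the proofs are below) =====
def Claim_equal_chunk_embed_lines_py : Prop := ∀ (lines : List String) (max_chars : Int), Dom_chunk_embed_lines_py lines max_chars → Spec_chunk_embed_lines_py lines max_chars (chunk_embed_lines_py lines max_chars)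

-- ===== LEMMAS AND PROOFS =====

-- A's segmentation loop only appends on the right to the segments accumulator
theorem pvSegAcc (lines : List String) :
    ∀ (segs : List (List String)) (cur : List String) (ic : Bool),
      lines.foldl pvSegStep (segs, cur, ic) =
        (segs ++ (lines.foldl pvSegStep ([], cur, ic)).1,
          (lines.foldl pvSegStep ([], cur, ic)).2.1,
          (lines.foldl pvSegStep ([], cur, ic)).2.2) := by
  induction lines with
  | nil => intro segs cur ic; simp
  | cons l ls ih =>
    intro segs cur ic
    simp only [List.foldl_cons]
    by_cases h1 : PySem.Chars.startswith (PySem.Chars.strip l.toList) ['`', '`', '`'] = true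
    · cases ic with
      | false =>
        by_cases h2 : cur = []
        · simp only [pvSegStep]
          simp [h1, h2]
          rw [ih segs [l] true]
        · simp only [pvSegStep]
          simp [h1, h2]
          rw [ih (segs ++ [cur]) [l] true, ih [cur] [l] true]
          simp
      | true =>
        simp only [pvSegStep]
        simp [h1]
        rw [ih (segs ++ [cur ++ [l]]) [] false, ih [cur ++ [l]] [] false]
        simp
    · cases ic with
      | true =>
        simp only [pvSegStep]
        simp [h1]
        rw [ih segs (cur ++ [l]) true]
      | false =>
        by_cases h3 : pvIsBreak l = true
        · by_cases h2 : cur = []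
          · simp only [pvSegStep]
            simp [h1, h2, h3]
            rw [ih segs [l] false]
          · simp only [pvSegStep]
            simp [h1, h2, h3]
            rw [ih (segs ++ [cur]) [l] false, ih [cur] [l] false]
            simp
        · simp only [pvSegStep]
          simp [h1, h3]
          rw [ih segs (cur ++ [l]) false]

-- fusion: B's single fused loop = A's segmentation loop followed by folding the
-- same packing step over the segments it produced
theorem pvFuse (mc : Int) (lines : List String) :
    ∀ (cur : List String) (ic : Bool) (pst : PvPackState),
      lines.foldl (pvBStep mc) (pst, cur, ic) =
        (((lines.foldl pvSegStep ([], cur, ic)).1).foldl (pvPackSeg mc) pst,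
          (lines.foldl pvSegStep ([], cur, ic)).2.1,
          (lines.foldl pvSegStep ([], cur, ic)).2.2) := by
  induction lines with
  | nil => intro cur ic pst; simp
  | cons l ls ih =>
    intro cur ic pst
    simp only [List.foldl_cons]
    by_cases h1 : PySem.Chars.startswith (PySem.Chars.strip l.toList) ['`', '`', '`'] = true
    · cases ic with
      | false =>
        by_cases h2 : cur = []
        · simp only [pvBStep, pvSegStep]
          simp [h1, h2]
          rw [ih [l] true pst]
        · simp only [pvBStep, pvSegStep]
          simp [h1, h2]
          rw [pvSegAcc ls [cur] [l] true, ih [l] true (pvPackSeg mc pst cur)]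
          simp
      | true =>
        simp only [pvBStep, pvSegStep]
        simp [h1]
        rw [pvSegAcc ls [cur ++ [l]] [] false, ih [] false (pvPackSeg mc pst (cur ++ [l]))]
        simp
    · cases ic with
      | true =>
        simp only [pvBStep, pvSegStep]
        simp [h1]
        rw [ih (cur ++ [l]) true pst]
      | false =>
        by_cases h3 : pvIsBreak l = true
        · by_cases h2 : cur = []
          · simp only [pvBStep, pvSegStep]
            simp [h1, h2, h3]
            rw [ih [l] false pst]
          · simp only [pvBStep, pvSegStep]
            simp [h1, h2, h3]
            rw [pvSegAcc ls [cur] [l] false, ih [l] false (pvPackSeg mc pst cur)]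
            simp
        · simp only [pvBStep, pvSegStep]
          simp [h1, h3]
          rw [ih (cur ++ [l]) false pst]

-- ===== VERDICT (by name: the statement is the Claim_ definition above) =====
theorem chunk_embed_lines_py_spec : Claim_equal_chunk_embed_lines_py := by
  intro lines max_chars _
  unfold Spec_chunk_embed_lines_py chunk_embed_lines_py chunk_embed_lines_py_alt
  rw [pvFuse max_chars lines [] false ([], [], 0)]
  by_cases h : (lines.foldl pvSegStep ([], [], false)).2.1 = []
  · simp [h]
  · simp [h, List.foldl_append]
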